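-- pv_equiv track=rewrite | github.com/Andyporras/Recursion_cola | contarDigitosDivisoresCola.py | sumaDeImpares
-- ===== SOURCE A (Python) =====
-- def sumaDeImpares(num,suma,contador,result):
--     if(num==0):
--         return result
--     elif(contador==2)and suma%2==1 and result!= False:
--         return sumaDeImpares(num,suma-suma,contador-2,True)
--     elif(contador==2):
--         return False
--     else:
--         return sumaDeImpares(num//10,suma+(num%10),contador+1,result)
-- ===== SOURCE B (Python) =====
-- def sumaDeImpares(num, suma, contador, result):
--     if num == 0:
--         return result
--     if result == False:
--         return False
--     # phase 1: finish the partial pair tracked by (suma, contador)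
--     while contador != 2:
--         suma += num % 10
--         num //= 10
--         contador += 1
--         if num == 0:
--             return True
--     if suma % 2 == 0:
--         return False
--     # phase 2: remaining digits, two at a time; no suma/contador/result state
--     while True:
--         d1 = num % 10
--         num //= 10
--         if num == 0:
--             return True
--         d2 = num % 10
--         num //= 10
--         if num == 0:
--             return True
--         if (d1 + d2) % 2 == 0:
--             return False
-- ===== Notes on version B (the rewrite author's own statement) =====
-- stated objective: alternative
-- what changed: B replaces A's four-variable tail recursion by a constant-time short-circuit for result=False plus two plain loops: one that finishes the partial digit pair tracked by (suma, contador) and one that scans the remaining digits two at a time with no suma/contador/result state.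
-- outside the precondition, e.g. on sumaDeImpares(-5, 0, -3, True): A returns False, B returns False; on sumaDeImpares(-9, 2, -1, False): A returns False, B returns False
import Mathlib
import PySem

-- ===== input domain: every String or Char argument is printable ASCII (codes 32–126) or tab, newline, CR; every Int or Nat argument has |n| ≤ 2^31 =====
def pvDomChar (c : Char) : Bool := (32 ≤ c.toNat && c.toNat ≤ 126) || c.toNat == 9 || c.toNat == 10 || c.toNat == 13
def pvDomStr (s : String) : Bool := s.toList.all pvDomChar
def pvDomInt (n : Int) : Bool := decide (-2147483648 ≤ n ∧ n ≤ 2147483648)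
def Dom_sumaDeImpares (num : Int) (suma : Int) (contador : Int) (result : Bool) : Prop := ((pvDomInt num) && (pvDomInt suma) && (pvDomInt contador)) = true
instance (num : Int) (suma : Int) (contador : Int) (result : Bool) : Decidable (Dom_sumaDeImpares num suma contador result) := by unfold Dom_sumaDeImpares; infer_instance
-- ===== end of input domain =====

-- B short-circuits result=False and scans the remaining digits two at a time in two plain loops,
-- instead of A's four-variable tail recursion (objective: alternative decomposition, no speed claim).

-- ===== PORT A =====
-- fuel is only a totality device: under Pre_ the fuel 3*|num|+9 is proved sufficient,
-- so the fuel-out branch is unreachable there.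
def sumaDeImparesFuel : Nat → Int → Int → Int → Bool → Bool
  | 0, _, _, _, _ => false
  | fuel+1, num, suma, contador, result =>
    if num = 0 then result
    else if contador = 2 ∧ PySem.Int.mod suma 2 = 1 ∧ result ≠ false then
      sumaDeImparesFuel fuel num (suma - suma) (contador - 2) true
    else if contador = 2 then false
    else sumaDeImparesFuel fuel (PySem.Int.floordiv num 10) (suma + PySem.Int.mod num 10) (contador + 1) result

def sumaDeImpares (num : Int) (suma : Int) (contador : Int) (result : Bool) : Bool :=
  sumaDeImparesFuel (3 * num.natAbs + 9) num suma contador result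

-- ===== PORT B =====
-- fuel again only makes the while-loops total; |num|+1 (resp. |num|+3) bounds the iterations under Pre_.
def pairsLoop : Nat → Int → Bool
  | 0, _ => false
  | fuel+1, num =>
    let d1 := PySem.Int.mod num 10
    let num1 := PySem.Int.floordiv num 10
    if num1 = 0 then true
    else
      let d2 := PySem.Int.mod num1 10
      let num2 := PySem.Int.floordiv num1 10
      if num2 = 0 then true
      else if PySem.Int.mod (d1 + d2) 2 = 0 then false
      else pairsLoop fuel num2

def finishLoop : Nat → Int → Int → Int → Bool
  | 0, _, _, _ => false
  | fuel+1, num, suma, contador =>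
    if contador ≠ 2 then
      let suma' := suma + PySem.Int.mod num 10
      let num' := PySem.Int.floordiv num 10
      if num' = 0 then true
      else finishLoop fuel num' suma' (contador + 1)
    else if PySem.Int.mod suma 2 = 0 then false
    else pairsLoop (num.natAbs + 1) num

def sumaDeImpares_alt (num : Int) (suma : Int) (contador : Int) (result : Bool) : Bool :=
  if num = 0 then result
  else if result = false then false
  else finishLoop (num.natAbs + 3) num suma contador

-- ===== PRECONDITION & SPEC =====
-- Pre_ admits every nonnegative num and, for negative num (where floor division never reaches 0),
-- the states with contador in [0,2]; negative num with contador outside [0,2] is excluded because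
-- there A's recursion depth is not bounded by the input's digits: for contador > 2 A always hits
-- Python's recursion limit (RecursionError), and for contador < 0 whether A returns or raises
-- depends on the interpreter's recursion limit, not on the input alone.
def Pre_sumaDeImpares (num : Int) (suma : Int) (contador : Int) (result : Bool) : Prop :=
  0 ≤ num ∨ (0 ≤ contador ∧ contador ≤ 2)
instance (num : Int) (suma : Int) (contador : Int) (result : Bool) : Decidable (Pre_sumaDeImpares num suma contador result) := by unfold Pre_sumaDeImpares; infer_instance
def pvWitness_sumaDeImpares : Int × Int × Int × Bool := (2461, 0, 0, true)

def Spec_sumaDeImpares (num : Int) (suma : Int) (contador : Int) (result : Bool) (out : Bool) : Prop := out = sumaDeImpares_alt num suma contador result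
instance (num : Int) (suma : Int) (contador : Int) (result : Bool) (out : Bool) : Decidable (Spec_sumaDeImpares num suma contador result out) := by unfold Spec_sumaDeImpares; infer_instance

-- ===== CLAIM (what is proved, stated in full; the proofs are below) =====
def Claim_equal_sumaDeImpares : Prop := ∀ (num : Int) (suma : Int) (contador : Int) (result : Bool), Dom_sumaDeImpares num suma contador result → Pre_sumaDeImpares num suma contador result → Spec_sumaDeImpares num suma contador result (sumaDeImpares num suma contador result)

-- ===== LEMMAS AND PROOFS =====
theorem fd_eq (n : Int) : PySem.Int.floordiv n 10 = n / 10 :=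
  PySem.Int.floordiv_eq_ediv_of_pos (by norm_num)

theorem md2_eq (s : Int) : PySem.Int.mod s 2 = s % 2 :=
  PySem.Int.mod_eq_emod_of_pos (by norm_num)

theorem mod2_cases (s : Int) : PySem.Int.mod s 2 = 0 ∨ PySem.Int.mod s 2 = 1 := by
  rw [md2_eq]; omega

theorem pairsLoop_succ (f : Nat) (n : Int) :
    pairsLoop (f+1) n =
      (if PySem.Int.floordiv n 10 = 0 then true
       else if PySem.Int.floordiv (PySem.Int.floordiv n 10) 10 = 0 then true
       else if PySem.Int.mod (PySem.Int.mod n 10 + PySem.Int.mod (PySem.Int.floordiv n 10) 10) 2 = 0 then false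
       else pairsLoop f (PySem.Int.floordiv (PySem.Int.floordiv n 10) 10)) := rfl

theorem finishLoop_succ (f : Nat) (n s c : Int) :
    finishLoop (f+1) n s c =
      (if c ≠ 2 then
        (if PySem.Int.floordiv n 10 = 0 then true
         else finishLoop f (PySem.Int.floordiv n 10) (s + PySem.Int.mod n 10) (c + 1))
       else if PySem.Int.mod s 2 = 0 then false
       else pairsLoop (n.natAbs + 1) n) := rfl

theorem afuel_succ (f : Nat) (n s c : Int) (r : Bool) :
    sumaDeImparesFuel (f+1) n s c r =
      (if n = 0 then r
       else if c = 2 ∧ PySem.Int.mod s 2 = 1 ∧ r ≠ false then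
         sumaDeImparesFuel f n (s - s) (c - 2) true
       else if c = 2 then false
       else sumaDeImparesFuel f (PySem.Int.floordiv n 10) (s + PySem.Int.mod n 10) (c + 1) r) := rfl

theorem pairsLoop_irrel (f : Nat) : ∀ (g : Nat) (n : Int), 1 ≤ n → n.natAbs + 1 ≤ f →
    n.natAbs + 1 ≤ g → pairsLoop f n = pairsLoop g n := by
  induction f with
  | zero => intro g n hn hf hg; exact absurd hf (by omega)
  | succ f ih =>
    intro g n hn hf hg
    cases g with
    | zero => exact absurd hg (by omega)
    | succ g =>
      have h1 := fd_eq n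
      have h2 := fd_eq (PySem.Int.floordiv n 10)
      rw [pairsLoop_succ, pairsLoop_succ]
      by_cases e1 : PySem.Int.floordiv n 10 = 0
      · rw [if_pos e1, if_pos e1]
      · rw [if_neg e1, if_neg e1]
        by_cases e2 : PySem.Int.floordiv (PySem.Int.floordiv n 10) 10 = 0
        · rw [if_pos e2, if_pos e2]
        · rw [if_neg e2, if_neg e2]
          by_cases e3 : PySem.Int.mod (PySem.Int.mod n 10 + PySem.Int.mod (PySem.Int.floordiv n 10) 10) 2 = 0
          · rw [if_pos e3, if_pos e3]
          · rw [if_neg e3, if_neg e3]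
            exact ih g _ (by omega) (by omega) (by omega)

theorem finishLoop_irrel (f : Nat) : ∀ (g : Nat) (n s c : Int), 1 ≤ n → n.natAbs + 1 ≤ f →
    n.natAbs + 1 ≤ g → finishLoop f n s c = finishLoop g n s c := by
  induction f with
  | zero => intro g n s c hn hf hg; exact absurd hf (by omega)
  | succ f ih =>
    intro g n s c hn hf hg
    cases g with
    | zero => exact absurd hg (by omega)
    | succ g =>
      have h1 := fd_eq n
      rw [finishLoop_succ, finishLoop_succ]
      by_cases hc : c = 2
      · rw [if_neg (not_not_intro hc), if_neg (not_not_intro hc)]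
      · rw [if_pos hc, if_pos hc]
        by_cases e1 : PySem.Int.floordiv n 10 = 0
        · rw [if_pos e1, if_pos e1]
        · rw [if_neg e1, if_neg e1]
          exact ih g _ _ _ (by omega) (by omega) (by omega)

theorem finishLoop_00 (f g : Nat) (n : Int) (hn : 1 ≤ n) (hf : n.natAbs + 3 ≤ f)
    (hg : n.natAbs + 1 ≤ g) : finishLoop f n 0 0 = pairsLoop g n := by
  obtain ⟨a, rfl⟩ : ∃ a, f = (a + 2) + 1 := ⟨f - 3, by omega⟩
  cases g with
  | zero => exact absurd hg (by omega)
  | succ g =>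
    have h1 := fd_eq n
    have h2 := fd_eq (PySem.Int.floordiv n 10)
    conv_rhs => rw [pairsLoop_succ]
    rw [finishLoop_succ, if_pos (show (0:Int) ≠ 2 by decide)]
    by_cases e1 : PySem.Int.floordiv n 10 = 0
    · rw [if_pos e1, if_pos e1]
    · rw [if_neg e1, if_neg e1,
        show a + 2 = (a + 1) + 1 from rfl, finishLoop_succ,
        if_pos (show (0:Int) + 1 ≠ 2 by decide)]
      by_cases e2 : PySem.Int.floordiv (PySem.Int.floordiv n 10) 10 = 0
      · rw [if_pos e2, if_pos e2]
      · rw [if_neg e2, if_neg e2, finishLoop_succ,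
          if_neg (not_not_intro (show (0:Int) + 1 + 1 = 2 by norm_num)),
          show (0:Int) + PySem.Int.mod n 10 + PySem.Int.mod (PySem.Int.floordiv n 10) 10
             = PySem.Int.mod n 10 + PySem.Int.mod (PySem.Int.floordiv n 10) 10 by ring]
        by_cases e3 : PySem.Int.mod (PySem.Int.mod n 10 + PySem.Int.mod (PySem.Int.floordiv n 10) 10) 2 = 0
        · rw [if_pos e3, if_pos e3]
        · rw [if_neg e3, if_neg e3]
          exact pairsLoop_irrel _ g _ (by omega) (by omega) (by omega)

theorem afuel_false (f : Nat) : ∀ (n s c : Int), 0 ≤ n → n.natAbs + 1 ≤ f →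
    sumaDeImparesFuel f n s c false = false := by
  induction f with
  | zero => intro n s c hn hf; exact absurd hf (by omega)
  | succ f ih =>
    intro n s c hn hf
    rw [afuel_succ]
    by_cases h0 : n = 0
    · rw [if_pos h0]
    · have h1 := fd_eq n
      rw [if_neg h0, if_neg (by simp)]
      by_cases hc : c = 2
      · rw [if_pos hc]
      · rw [if_neg hc]
        exact ih _ _ _ (by omega) (by omega)

theorem afuel_eq_alt (f : Nat) : ∀ (n s c : Int) (r : Bool), 0 ≤ n →
    3 * n.natAbs + 1 ≤ f → (c = 2 → 3 * n.natAbs + 2 ≤ f) →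
    sumaDeImparesFuel f n s c r = sumaDeImpares_alt n s c r := by
  induction f with
  | zero => intro n s c r hn hf1 _; exact absurd hf1 (by omega)
  | succ f ih =>
    intro n s c r hn hf1 hf2
    by_cases h0 : n = 0
    · rw [afuel_succ, if_pos h0]
      simp only [sumaDeImpares_alt]
      rw [if_pos h0]
    · have hn1 : 1 ≤ n := by omega
      have h1 := fd_eq n
      simp only [sumaDeImpares_alt]
      rw [afuel_succ, if_neg h0, if_neg h0]
      cases r with
      | false =>
        rw [if_neg (by simp), if_pos rfl]
        by_cases hc : c = 2
        · rw [if_pos hc]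
        · rw [if_neg hc]
          exact afuel_false f _ _ _ (by omega) (by omega)
      | true =>
        rw [if_neg (show ¬ (true = false) by decide)]
        by_cases hc : c = 2
        · subst hc
          have hf2' := hf2 rfl
          rcases mod2_cases s with hm | hm
          · -- even partial sum: both sides return false
            rw [if_neg (by rw [hm]; simp), if_pos rfl]
            conv_rhs => rw [show n.natAbs + 3 = (n.natAbs + 2) + 1 from rfl, finishLoop_succ]
            rw [if_neg (not_not_intro rfl), if_pos hm]
          · -- odd partial sum: A resets, B enters the pair loop
            rw [if_pos ⟨rfl, hm, by decide⟩,
              show s - s = (0:Int) by ring, show (2:Int) - 2 = 0 by norm_num,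
              ih n 0 0 true hn (by omega) (by intro h; exact absurd h (by norm_num))]
            simp only [sumaDeImpares_alt]
            rw [if_neg h0, if_neg (show ¬ (true = false) by decide),
              finishLoop_00 (n.natAbs + 3) (n.natAbs + 1) n hn1 (by omega) (by omega)]
            conv_rhs => rw [show n.natAbs + 3 = (n.natAbs + 2) + 1 from rfl, finishLoop_succ]
            rw [if_neg (not_not_intro rfl), if_neg (by rw [hm]; norm_num)]
        · -- still filling the pair: one digit step on both sides
          rw [if_neg (by simp [hc]), if_neg hc,
            ih _ _ _ true (by omega) (by omega) (by intro _; omega)]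
          simp only [sumaDeImpares_alt]
          conv_rhs => rw [show n.natAbs + 3 = (n.natAbs + 2) + 1 from rfl, finishLoop_succ]
          rw [if_pos hc]
          by_cases e1 : PySem.Int.floordiv n 10 = 0
          · rw [if_pos e1, if_pos e1]
          · rw [if_neg e1, if_neg e1, if_neg (show ¬ (true = false) by decide)]
            exact finishLoop_irrel _ _ _ _ _ (by omega) (by omega) (by omega)

theorem afuel_neg_false (f : Nat) (n s c : Int) (r : Bool) (hn : n < 0) (hf : 3 ≤ f)
    (hc : 0 ≤ c ∧ c ≤ 2) (h : r = false ∨ (c = 2 ∧ PySem.Int.mod s 2 = 0)) :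
    sumaDeImparesFuel f n s c r = false := by
  obtain ⟨a, rfl⟩ : ∃ a, f = (a + 2) + 1 := ⟨f - 3, by omega⟩
  have h1 := fd_eq n
  have h2 := fd_eq (PySem.Int.floordiv n 10)
  have hn1 : ¬ n = 0 := by omega
  have hn2 : ¬ PySem.Int.floordiv n 10 = 0 := by omega
  have hn3 : ¬ PySem.Int.floordiv (PySem.Int.floordiv n 10) 10 = 0 := by omega
  rcases h with hr | ⟨hc2, hm⟩
  · subst hr
    rcases show c = 0 ∨ c = 1 ∨ c = 2 by omega with hcc | hcc | hcc <;> subst hcc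
    · rw [afuel_succ, if_neg hn1, if_neg (by simp), if_neg (by norm_num),
        afuel_succ, if_neg hn2, if_neg (by simp), if_neg (by norm_num),
        afuel_succ, if_neg hn3, if_neg (by simp), if_pos (by norm_num)]
    · rw [afuel_succ, if_neg hn1, if_neg (by simp), if_neg (by norm_num),
        afuel_succ, if_neg hn2, if_neg (by simp), if_pos (by norm_num)]
    · rw [afuel_succ, if_neg hn1, if_neg (by simp), if_pos rfl]
  · rw [afuel_succ, if_neg hn1,
      if_neg (by rintro ⟨_, hx, _⟩; rw [hm] at hx; exact absurd hx (by norm_num)),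
      if_pos hc2]

theorem alt_neg_false (n s c : Int) (r : Bool) (hn : n < 0)
    (h : r = false ∨ (c = 2 ∧ PySem.Int.mod s 2 = 0)) :
    sumaDeImpares_alt n s c r = false := by
  have hn1 : ¬ n = 0 := by omega
  simp only [sumaDeImpares_alt]
  rcases h with hr | ⟨hc2, hm⟩
  · rw [if_neg hn1, if_pos hr]
  · subst hc2
    cases r with
    | false => rw [if_neg hn1, if_pos rfl]
    | true =>
      rw [if_neg hn1, if_neg (show ¬ (true = false) by decide),
        show n.natAbs + 3 = (n.natAbs + 2) + 1 from rfl, finishLoop_succ,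
        if_neg (not_not_intro rfl), if_pos hm]

theorem md10_eq (s : Int) : PySem.Int.mod s 10 = s % 10 :=
  PySem.Int.mod_eq_emod_of_pos (by norm_num)

theorem m9 : PySem.Int.mod (-1 : Int) 10 = 9 := by rw [md10_eq]; decide

theorem f1 : PySem.Int.floordiv (-1 : Int) 10 = -1 := by rw [fd_eq]; decide

theorem neg1_c2 (f : Nat) (s : Int) (hf : 6 ≤ f) :
    sumaDeImparesFuel f (-1) s 2 true = false := by
  obtain ⟨a, rfl⟩ : ∃ a, f = (a + 3) + 1 := ⟨f - 4, by omega⟩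
  rcases mod2_cases s with hm | hm
  · rw [afuel_succ, if_neg (by norm_num),
      if_neg (by rintro ⟨_, hx, _⟩; rw [hm] at hx; exact absurd hx (by norm_num)),
      if_pos rfl]
  · rw [afuel_succ, if_neg (by norm_num), if_pos ⟨rfl, hm, by decide⟩,
      show s - s = (0:Int) by ring, show (2:Int) - 2 = 0 by norm_num,
      afuel_succ, if_neg (by norm_num),
      if_neg (by rintro ⟨hx, _, _⟩; exact absurd hx (by norm_num)),
      if_neg (by norm_num), f1, m9,
      afuel_succ, if_neg (by norm_num),
      if_neg (by rintro ⟨hx, _, _⟩; exact absurd hx (by norm_num)),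
      if_neg (by norm_num), f1, m9,
      afuel_succ, if_neg (by norm_num),
      if_neg (by rintro ⟨_, hx, _⟩; rw [md2_eq] at hx; exact absurd hx (by decide)),
      if_pos (by norm_num)]

theorem neg1_any (f : Nat) (s c : Int) (r : Bool) (hf : 8 ≤ f) (hc0 : 0 ≤ c) (hc2 : c ≤ 2) :
    sumaDeImparesFuel f (-1) s c r = false := by
  cases r with
  | false => exact afuel_neg_false f (-1) s c false (by norm_num) (by omega) ⟨hc0, hc2⟩ (Or.inl rfl)
  | true =>
    rcases show c = 0 ∨ c = 1 ∨ c = 2 by omega with hcc | hcc | hcc <;> subst hcc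
    · obtain ⟨a, rfl⟩ : ∃ a, f = (a + 1) + 1 := ⟨f - 2, by omega⟩
      rw [afuel_succ, if_neg (by norm_num),
        if_neg (by rintro ⟨hx, _, _⟩; exact absurd hx (by norm_num)),
        if_neg (by norm_num), f1, m9,
        afuel_succ, if_neg (by norm_num),
        if_neg (by rintro ⟨hx, _, _⟩; exact absurd hx (by norm_num)),
        if_neg (by norm_num), f1, m9]
      exact neg1_c2 a _ (by omega)
    · obtain ⟨a, rfl⟩ : ∃ a, f = a + 1 := ⟨f - 1, by omega⟩
      rw [afuel_succ, if_neg (by norm_num),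
        if_neg (by rintro ⟨hx, _, _⟩; exact absurd hx (by norm_num)),
        if_neg (by norm_num), f1, m9]
      exact neg1_c2 a _ (by omega)
    · exact neg1_c2 _ s (by omega)

theorem afuel_neg (f : Nat) : ∀ (n s c : Int) (r : Bool), n < 0 → 0 ≤ c → c ≤ 2 →
    3 * n.natAbs + 8 ≤ f → (c = 2 → 3 * n.natAbs + 9 ≤ f) →
    sumaDeImparesFuel f n s c r = false := by
  induction f with
  | zero => intro n s c r _ _ _ hf1 _; exact absurd hf1 (by omega)
  | succ f ih =>
    intro n s c r hn hc0 hc2 hf1 hf2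
    by_cases h1 : n = -1
    · subst h1; exact neg1_any _ s c r (by omega) hc0 hc2
    · have hn2 : n ≤ -2 := by omega
      have hfd := fd_eq n
      have hfdneg : PySem.Int.floordiv n 10 < 0 := by omega
      have hfdlt : (PySem.Int.floordiv n 10).natAbs < n.natAbs := by omega
      cases r with
      | false =>
        exact afuel_neg_false _ n s c false hn (by omega) ⟨hc0, hc2⟩ (Or.inl rfl)
      | true =>
        by_cases hcc : c = 2
        · subst hcc
          have hf2' := hf2 rfl
          rcases mod2_cases s with hm | hm
          · exact afuel_neg_false _ n s 2 true hn (by omega) ⟨by norm_num, by norm_num⟩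
              (Or.inr ⟨rfl, hm⟩)
          · rw [afuel_succ, if_neg (by omega), if_pos ⟨rfl, hm, by decide⟩,
              show s - s = (0:Int) by ring, show (2:Int) - 2 = 0 by norm_num]
            exact ih n 0 0 true hn (by norm_num) (by norm_num) (by omega)
              (by intro h; exact absurd h (by norm_num))
        · rw [afuel_succ, if_neg (by omega),
            if_neg (by rintro ⟨hx, _, _⟩; exact hcc hx), if_neg hcc]
          exact ih _ _ _ true hfdneg (by omega) (by omega) (by omega) (by intro _; omega)

theorem pairsLoop_neg (f : Nat) : ∀ (n : Int), n < 0 → n.natAbs + 1 ≤ f →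
    pairsLoop f n = false := by
  induction f with
  | zero => intro n _ hf; exact absurd hf (by omega)
  | succ f ih =>
    intro n hn hf
    have h1 := fd_eq n
    have h2 := fd_eq (PySem.Int.floordiv n 10)
    rw [pairsLoop_succ, if_neg (by omega), if_neg (by omega)]
    by_cases e3 : PySem.Int.mod (PySem.Int.mod n 10 + PySem.Int.mod (PySem.Int.floordiv n 10) 10) 2 = 0
    · rw [if_pos e3]
    · rw [if_neg e3]
      by_cases hm1 : n = -1
      · subst hm1
        exact absurd (show PySem.Int.mod (PySem.Int.mod (-1:Int) 10 + PySem.Int.mod (PySem.Int.floordiv (-1:Int) 10) 10) 2 = 0 by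
          rw [f1, m9, md2_eq]; decide) e3
      · exact ih _ (by omega) (by omega)

theorem finishLoop_c2_neg (f : Nat) (n s : Int) (hn : n < 0) (hf : 1 ≤ f) :
    finishLoop f n s 2 = false := by
  obtain ⟨a, rfl⟩ : ∃ a, f = a + 1 := ⟨f - 1, by omega⟩
  rw [finishLoop_succ, if_neg (not_not_intro rfl)]
  rcases mod2_cases s with hm | hm
  · rw [if_pos hm]
  · rw [if_neg (by omega)]
    exact pairsLoop_neg _ n hn (by omega)

theorem alt_neg (n s c : Int) (r : Bool) (hn : n < 0) (hc0 : 0 ≤ c) (hc2 : c ≤ 2) :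
    sumaDeImpares_alt n s c r = false := by
  cases r with
  | false => exact alt_neg_false n s c false hn (Or.inl rfl)
  | true =>
    simp only [sumaDeImpares_alt]
    rw [if_neg (by omega), if_neg (show ¬ (true = false) by decide)]
    have hfd := fd_eq n
    have hfd2 := fd_eq (PySem.Int.floordiv n 10)
    rcases show c = 0 ∨ c = 1 ∨ c = 2 by omega with hcc | hcc | hcc <;> subst hcc
    · rw [show n.natAbs + 3 = (n.natAbs + 2) + 1 from rfl, finishLoop_succ,
        if_pos (by norm_num), if_neg (by omega),
        show n.natAbs + 2 = (n.natAbs + 1) + 1 from rfl, finishLoop_succ,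
        if_pos (by norm_num), if_neg (by omega)]
      exact finishLoop_c2_neg _ _ _ (by omega) (by omega)
    · rw [show n.natAbs + 3 = (n.natAbs + 2) + 1 from rfl, finishLoop_succ,
        if_pos (by norm_num), if_neg (by omega)]
      exact finishLoop_c2_neg _ _ _ (by omega) (by omega)
    · exact finishLoop_c2_neg _ _ _ hn (by omega)

-- ===== VERDICT (by name: the statement is the Claim_ definition above) =====
theorem sumaDeImpares_spec : Claim_equal_sumaDeImpares := by
  intro num suma contador result _ hpre
  unfold Spec_sumaDeImpares sumaDeImpares
  by_cases hnn : 0 ≤ num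
  · exact afuel_eq_alt _ num suma contador result hnn (by omega) (by intro _; omega)
  · have hn : num < 0 := by omega
    rcases hpre with h0 | ⟨hc0, hc2⟩
    · exact absurd h0 hnn
    · rw [afuel_neg _ num suma contador result hn hc0 hc2 (by omega) (by intro _; omega),
        alt_neg num suma contador result hn hc0 hc2]
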